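-- pv_equiv track=rewrite | github.com/myst72/kogitune | kogitune/adhocs/stack.py | find_simkey
-- ===== SOURCE A (Python) =====
-- def edit_distance(s1, s2):
--     if len(s1) < len(s2):
--         return edit_distance(s2, s1)
--
--     if len(s2) == 0:
--         return len(s1)
--
--     previous_row = range(len(s2) + 1)
--     for i, c1 in enumerate(s1):
--         current_row = [i + 1]
--         for j, c2 in enumerate(s2):
--             insertions = previous_row[j + 1] + 1
--             deletions = current_row[j] + 1
--             substitutions = previous_row[j] + (c1 != c2)
--             current_row.append(min(insertions, deletions, substitutions))
--         previous_row = current_row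
--     return previous_row[-1]
--
-- def find_simkey(dic, given_key, max_distance=1):
--     key_map = {}
--     for key in dic.keys():
--         if key not in key_map:
--             key_map[key] = edit_distance(key, given_key)
--     keys = sorted([(dis, k) for k, dis in key_map.items() if dis <= max_distance])
--     if len(keys) > 0:
--         # debug_print(keys)
--         return keys[0][1]
--     return None
-- ===== SOURCE B (Python) =====
-- def edit_distance(s1, s2):
--     if len(s1) < len(s2):
--         return edit_distance(s2, s1)
--
--     if len(s2) == 0:
--         return len(s1)
--
--     previous_row = range(len(s2) + 1)
--     for i, c1 in enumerate(s1):
--         current_row = [i + 1]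
--         for j, c2 in enumerate(s2):
--             insertions = previous_row[j + 1] + 1
--             deletions = current_row[j] + 1
--             substitutions = previous_row[j] + (c1 != c2)
--             current_row.append(min(insertions, deletions, substitutions))
--         previous_row = current_row
--     return previous_row[-1]
--
-- def find_simkey(dic, given_key, max_distance=1):
--     best = None
--     for key in dic:
--         dis = edit_distance(key, given_key)
--         if dis <= max_distance and (best is None or dis < best[0] or (dis == best[0] and key < best[1])):
--             best = (dis, key)
--     return None if best is None else best[1]
-- ===== Notes on version B (the rewrite author's own statement) =====
-- stated objective: simpler
-- what changed: Replaced the build-a-dict / filter / sort-then-take-first pipeline by a single linear scan that keeps the running lexicographic minimum (dist, key); no intermediate dict, list or sort.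
import Mathlib
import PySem

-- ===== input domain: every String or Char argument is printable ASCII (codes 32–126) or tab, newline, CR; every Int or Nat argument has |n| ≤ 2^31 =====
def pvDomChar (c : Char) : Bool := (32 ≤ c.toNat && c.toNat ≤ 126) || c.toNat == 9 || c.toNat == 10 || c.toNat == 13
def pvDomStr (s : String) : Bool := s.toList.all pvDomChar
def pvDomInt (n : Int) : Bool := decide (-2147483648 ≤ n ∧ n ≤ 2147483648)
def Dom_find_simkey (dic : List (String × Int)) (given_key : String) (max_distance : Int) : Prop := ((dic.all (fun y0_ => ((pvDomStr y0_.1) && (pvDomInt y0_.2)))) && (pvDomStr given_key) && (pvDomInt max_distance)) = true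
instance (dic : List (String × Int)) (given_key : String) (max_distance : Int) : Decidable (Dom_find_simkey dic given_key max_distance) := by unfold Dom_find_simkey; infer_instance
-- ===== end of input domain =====

-- B replaces A's dict-build / filter / sort pipeline by a single scan keeping the running
-- lexicographic minimum (dist, key); same return value, simpler structure.

-- ===== PORT A =====
-- shared helper: literal port of edit_distance (identical in Source A and Source B), over List Char
def edChars (l1 l2 : List Char) : Int :=
  if h : l1.length < l2.length then
    edChars l2 l1
  else if l2.length = 0 then
    (l1.length : Int)
  else
    let previous_row : List Int := PySem.List.pyRange 0 ((l2.length : Int) + 1) 1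
    let previous_row := (PySem.List.enumerate l1).foldl (fun prev (p : Int × Char) =>
      let current_row : List Int := [p.1 + 1]
      let current_row := (PySem.List.enumerate l2).foldl (fun cur (q : Int × Char) =>
        let insertions := PySem.List.pyGetD prev (q.1 + 1) 0 + 1
        let deletions := PySem.List.pyGetD cur q.1 0 + 1
        let substitutions := PySem.List.pyGetD prev q.1 0 + (if p.2 ≠ q.2 then 1 else 0)
        cur ++ [min (min insertions deletions) substitutions]) current_row
      current_row) previous_row
    PySem.List.pyGetD previous_row (-1) 0
termination_by l2.length
decreasing_by exact h

def edit_distance (s1 s2 : String) : Int := edChars s1.toList s2.toList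

def find_simkey (dic : List (String × Int)) (given_key : String) (max_distance : Int) : Option String :=
  -- 'dic' is a Python dict: its keys are the first occurrences, in order
  let key_map := (PySem.List.dedup (dic.map Prod.fst)).foldl
      (fun m key => if m.contains key = false then m.insert key (edit_distance key given_key) else m)
      (PySem.Dict.empty : PySem.Dict String Int)
  let keys := PySem.List.sorted2
      (key_map.items.filterMap (fun p => if p.2 ≤ max_distance then some (p.2, p.1) else none))
      Prod.fst Prod.snd
  match keys with
  | [] => none
  | p :: _ => some p.2

-- ===== PORT B =====
def find_simkey_alt (dic : List (String × Int)) (given_key : String) (max_distance : Int) : Option String :=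
  let best := (PySem.List.dedup (dic.map Prod.fst)).foldl (fun best key =>
    let dis := edit_distance key given_key
    if dis ≤ max_distance &&
        (match best with
         | none => true
         | some b => decide (dis < b.1) || (dis == b.1 && decide (key < b.2))) then
      some (dis, key)
    else best) (none : Option (Int × String))
  match best with
  | none => none
  | some b => some b.2

-- ===== PRECONDITION & SPEC =====
def Spec_find_simkey (dic : List (String × Int)) (given_key : String) (max_distance : Int) (out : Option String) : Prop := out = find_simkey_alt dic given_key max_distance
instance (dic : List (String × Int)) (given_key : String) (max_distance : Int) (out : Option String) : Decidable (Spec_find_simkey dic given_key max_distance out) := by unfold Spec_find_simkey; infer_instance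

-- ===== CLAIM (what is proved, stated in full; the proofs are below) =====
def Claim_equal_find_simkey : Prop := ∀ (dic : List (String × Int)) (given_key : String) (max_distance : Int), Dom_find_simkey dic given_key max_distance → Spec_find_simkey dic given_key max_distance (find_simkey dic given_key max_distance)

-- ===== LEMMAS AND PROOFS =====

-- the minimum-keeping step of B's loop, on an already-computed candidate pair
def mstep (best : Option (Int × String)) (x : Int × String) : Option (Int × String) :=
  match best with
  | none => some x
  | some b => if (decide (x.1 < b.1) || (x.1 == b.1 && decide (x.2 < b.2))) = true then some x else some b

-- A's key_map loop over fresh, distinct keys just tabulates edit_distance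
theorem items_guard_fold (g : String) (ks : List String) (d : PySem.Dict String Int)
    (hnd : ks.Nodup) (hf : ∀ k ∈ ks, d.contains k = false) :
    (ks.foldl (fun m key => if m.contains key = false then m.insert key (edit_distance key g) else m) d).items
      = d.items ++ ks.map (fun k => (k, edit_distance k g)) := by
  induction ks generalizing d with
  | nil => simp
  | cons k ks ih =>
    have hk : d.contains k = false := hf k (by simp)
    have hstep : (if d.contains k = false then d.insert k (edit_distance k g) else d)
        = d.insert k (edit_distance k g) := by simp [hk]
    simp only [List.foldl_cons, hstep]
    rw [ih (d.insert k (edit_distance k g)) hnd.of_cons]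
    · rw [PySem.Dict.items_insert_of_not_contains _ _ hk]
      simp
    · intro k' hk'
      rw [PySem.Dict.contains_insert]
      have hne : k' ≠ k := by
        rintro rfl; exact (List.nodup_cons.mp hnd).1 hk'
      simp [hne, hf k' (List.mem_cons_of_mem _ hk')]

-- head of the stable two-key insertion sort = the fold keeping the first lexicographic minimum
theorem head_sorted2_eq_foldl (cand : List (Int × String)) :
    (PySem.List.sorted2 cand Prod.fst Prod.snd false).head? = cand.foldl mstep none := by
  induction cand using List.reverseRecOn with
  | nil => simp [PySem.List.sorted2]
  | append_singleton xs x ih =>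
    have hs : PySem.List.sorted2 (xs ++ [x]) Prod.fst Prod.snd false
        = PySem.List.insertBy
            (fun a b => decide (a.1 < b.1) || (!decide (b.1 < a.1) && decide (a.2 < b.2)))
            x (PySem.List.sorted2 xs Prod.fst Prod.snd false) := by
      simp [PySem.List.sorted2, List.foldl_append]
    rw [hs, List.foldl_append, List.foldl_cons, List.foldl_nil, ← ih]
    cases hxs : PySem.List.sorted2 xs Prod.fst Prod.snd false with
    | nil => simp [PySem.List.insertBy, mstep]
    | cons h t =>
      have hb : (decide (x.1 < h.1) || (!decide (h.1 < x.1) && decide (x.2 < h.2)))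
          = (decide (x.1 < h.1) || (x.1 == h.1 && decide (x.2 < h.2))) := by
        by_cases h1 : x.1 < h.1
        · simp [h1]
        · by_cases h2 : h.1 < x.1
          · have hne : (x.1 == h.1) = false := by simp; omega
            simp [h1, h2, hne]
          · have he : (x.1 == h.1) = true := by simp; omega
            simp [h1, h2, he]
      simp only [PySem.List.insertBy, mstep, hb]
      by_cases hp : x.1 < h.1 ∨ (x.1 = h.1 ∧ x.2.toList < h.2.toList)
      · simp [hp]
      · simp [hp]

-- B's guarded loop is the min-fold over the filtered candidate list
theorem bfold_eq_filterMap (g : String) (md : Int) (ks : List String)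
    (acc : Option (Int × String)) :
    ks.foldl (fun best key =>
      let dis := edit_distance key g
      if dis ≤ md &&
          (match best with
           | none => true
           | some b => decide (dis < b.1) || (dis == b.1 && decide (key < b.2))) then
        some (dis, key)
      else best) acc
    = (ks.filterMap (fun k => if edit_distance k g ≤ md then some (edit_distance k g, k) else none)).foldl mstep acc := by
  induction ks generalizing acc with
  | nil => rfl
  | cons k ks ih =>
    rw [List.foldl_cons, List.filterMap_cons]
    by_cases hd : edit_distance k g ≤ md
    · rw [if_pos hd, List.foldl_cons, ih]
      congr 1
      cases acc with
      | none => simp [mstep, hd]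
      | some b => simp only [mstep]; simp [hd]
    · rw [if_neg hd, ih]
      congr 1
      cases acc with
      | none => simp [hd]
      | some b => simp [hd]

-- ===== VERDICT (by name: the statement is the Claim_ definition above) =====
theorem find_simkey_spec : Claim_equal_find_simkey := by
  intro dic given_key max_distance _
  unfold Spec_find_simkey find_simkey find_simkey_alt
  set ks := PySem.List.dedup (dic.map Prod.fst) with hks
  have hitems : ((ks.foldl
      (fun m key => if m.contains key = false then m.insert key (edit_distance key given_key) else m)
      (PySem.Dict.empty : PySem.Dict String Int)).items)
      = ks.map (fun k => (k, edit_distance k given_key)) := by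
    rw [items_guard_fold given_key ks PySem.Dict.empty (PySem.List.nodup_dedup _)
      (by intro k _; simp [PySem.Dict.contains_empty])]
    simp [PySem.Dict.empty]
  simp only [hitems, List.filterMap_map]
  rw [bfold_eq_filterMap]
  have heq : (fun k => if edit_distance k given_key ≤ max_distance
        then some (edit_distance k given_key, k) else none)
      = ((fun p : String × Int => if p.2 ≤ max_distance then some (p.2, p.1) else none) ∘
         (fun k => (k, edit_distance k given_key))) := by
    funext k; simp [Function.comp]
  rw [heq]
  set cand := ks.filterMap ((fun p : String × Int => if p.2 ≤ max_distance then some (p.2, p.1) else none) ∘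
      (fun k => (k, edit_distance k given_key)))
  have h := head_sorted2_eq_foldl cand
  cases hsc : PySem.List.sorted2 cand Prod.fst Prod.snd false with
  | nil =>
    rw [hsc] at h
    rw [← h]
    rfl
  | cons p t =>
    rw [hsc] at h
    rw [← h]
    rfl
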